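-- pv_equiv track=rewrite | github.com/open-edge-platform/edge-system-qualification | src/esq/utils/services/dockerhub_app.py | _sanitize_error_text
-- ===== SOURCE A (Python) =====
-- def _sanitize_error_text(text: str, max_chars: int = 600) -> str:
--     """Return a compact error summary suitable for reports."""
--     lines = [line.strip() for line in str(text).splitlines() if line.strip()]
--     if not lines:
--         return "Unknown error"
--
--     priority_markers = (
--         "error",
--         "failed",
--         "timeout",
--         "tls",
--         "denied",
--         "unauthorized",
--     )
--     selected = None
--     for line in reversed(lines):
--         lowered = line.lower()
--         if any(marker in lowered for marker in priority_markers):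
--             selected = line
--             break
--     if selected is None:
--         selected = lines[-1]
--
--     return selected[:max_chars]
-- ===== SOURCE B (Python) =====
-- def _sanitize_error_text(text: str, max_chars: int = 600) -> str:
--     """Return a compact error summary suitable for reports."""
--     markers = ("error", "failed", "timeout", "tls", "denied", "unauthorized")
--     last_line = None   # last non-blank stripped line seen so far
--     best = None        # last marker-bearing line seen so far
--     for raw in str(text).splitlines():
--         line = raw.strip()
--         if not line:
--             continue
--         last_line = line
--         low = line.lower()
--         for m in markers:
--             if m in low:
--                 best = line
--                 break
--     if last_line is None:
--         return "Unknown error"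
--     selected = best if best is not None else last_line
--     return selected[:max_chars]
-- ===== Notes on version B (the rewrite author's own statement) =====
-- stated objective: alternative
-- what changed: Replaces A's build-a-list-then-reverse-scan-with-break by a single fused forward pass over the raw lines that never materializes the normalized line list: two accumulators track the last non-blank line and the last marker-bearing line, and the answer is read off the accumulators at the end.
import Mathlib
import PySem

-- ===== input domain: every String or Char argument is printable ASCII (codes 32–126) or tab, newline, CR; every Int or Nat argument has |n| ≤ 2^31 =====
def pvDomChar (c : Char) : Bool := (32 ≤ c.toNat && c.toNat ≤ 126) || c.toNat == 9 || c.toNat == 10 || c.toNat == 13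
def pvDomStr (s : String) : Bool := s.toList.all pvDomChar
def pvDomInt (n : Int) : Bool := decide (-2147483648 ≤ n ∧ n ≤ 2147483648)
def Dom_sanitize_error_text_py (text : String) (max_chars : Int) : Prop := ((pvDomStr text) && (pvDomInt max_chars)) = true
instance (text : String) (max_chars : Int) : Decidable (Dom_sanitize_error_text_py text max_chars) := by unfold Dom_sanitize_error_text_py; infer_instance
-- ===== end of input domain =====

-- B fuses A's staged passes (build normalized line list, reverse-scan with break) into one forward pass with two accumulators; alternative decomposition, same cost.


def pvMarkers : List String := ["error", "failed", "timeout", "tls", "denied", "unauthorized"]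

def pvHasMarker (l : String) : Bool :=
  pvMarkers.any (fun m => PySem.Str.isIn m (PySem.Str.lower l))

-- ===== PORT A =====
def pvLinesA (text : String) : List String :=
  ((PySem.Str.splitlines text).map PySem.Str.strip).filter (fun l => !(l == ""))

-- the 'for line in reversed(lines): … break' loop, as structural recursion over the reversed list
def pvScanA : List String → Option String
  | [] => none
  | l :: rest => if pvHasMarker l then some l else pvScanA rest

def sanitize_error_text_py (text : String) (max_chars : Int) : String :=
  let lines := pvLinesA text
  if lines == [] then "Unknown error"
  else
    let selected :=
      match pvScanA lines.reverse with
      | some l => l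
      | none => (PySem.List.pyGet? lines (-1)).getD ""   -- lines[-1]; lines nonempty here
    PySem.Str.slice selected none (some max_chars)

-- ===== PORT B =====
-- one fused pass: state = (last non-blank line so far, last marker-bearing line so far)
def pvStepB (st : Option String × Option String) (raw : String) : Option String × Option String :=
  let line := PySem.Str.strip raw
  if line == "" then st
  else (some line, if pvHasMarker line then some line else st.2)

def sanitize_error_text_py_alt (text : String) (max_chars : Int) : String :=
  let st := (PySem.Str.splitlines text).foldl pvStepB (none, none)
  match st.1 with
  | none => "Unknown error"
  | some last => PySem.Str.slice (st.2.getD last) none (some max_chars)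

-- ===== PRECONDITION & SPEC =====
def Spec_sanitize_error_text_py (text : String) (max_chars : Int) (out : String) : Prop := out = sanitize_error_text_py_alt text max_chars
instance (text : String) (max_chars : Int) (out : String) : Decidable (Spec_sanitize_error_text_py text max_chars out) := by unfold Spec_sanitize_error_text_py; infer_instance

-- ===== CLAIM (what is proved, stated in full; the proofs are below) =====
def Claim_equal_sanitize_error_text_py : Prop := ∀ (text : String) (max_chars : Int), Dom_sanitize_error_text_py text max_chars → Spec_sanitize_error_text_py text max_chars (sanitize_error_text_py text max_chars)

-- ===== LEMMAS AND PROOFS =====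
-- normalized lines of a raw line list (what A materializes and B only tracks implicitly)
def pvNorm (raws : List String) : List String :=
  (raws.map PySem.Str.strip).filter (fun l => !(l == ""))

theorem pvNorm_cons (r : String) (rs : List String) :
    pvNorm (r :: rs) =
      if PySem.Str.strip r == "" then pvNorm rs else PySem.Str.strip r :: pvNorm rs := by
  by_cases h : PySem.Str.strip r = "" <;> simp [pvNorm, List.filter_cons, h]

-- last element of a cons, as Option.or (used to peel B's accumulator updates)
theorem pv_getLast?_cons_or {α : Type} (a : α) (l : List α) :
    (a :: l).getLast? = (l.getLast?).or (some a) := by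
  cases hl : l.getLast? with
  | none =>
    have : l = [] := by simpa [List.getLast?_eq_none_iff] using hl
    simp [this]
  | some z =>
    rcases List.eq_nil_or_concat l with h0 | ⟨l', w, hw⟩
    · simp [h0] at hl
    · subst hw
      have h2 : (a :: (l' ++ [w])).getLast? = some w := by
        rw [← List.cons_append, List.getLast?_concat]
      simp only [List.concat_eq_append, List.getLast?_concat, Option.some.injEq] at hl
      subst hl
      simpa [List.concat_eq_append] using h2

-- loop invariant of B's fused pass
theorem foldB (raws : List String) (st : Option String × Option String) :
    raws.foldl pvStepB st =
      (((pvNorm raws).getLast?).or st.1,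
       (((pvNorm raws).filter pvHasMarker).getLast?).or st.2) := by
  induction raws generalizing st with
  | nil => simp [pvNorm]
  | cons r rs ih =>
    rw [List.foldl_cons, ih, pvNorm_cons]
    by_cases h : PySem.Str.strip r == ""
    · simp [pvStepB, h]
    · cases hm : pvHasMarker (PySem.Str.strip r) <;>
        simp [pvStepB, h, hm, List.filter_cons, pv_getLast?_cons_or, Option.or_assoc]

theorem pvScanA_eq_find? (xs : List String) : pvScanA xs = xs.find? pvHasMarker := by
  induction xs with
  | nil => rfl
  | cons l rest ih => simp [pvScanA, List.find?, ih]; cases pvHasMarker l <;> simp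

-- first match of the reverse scan = last element of the forward filter
theorem pvScanA_reverse (xs : List String) :
    pvScanA xs.reverse = (xs.filter pvHasMarker).getLast? := by
  rw [pvScanA_eq_find?, ← List.head?_filter, List.filter_reverse, List.head?_reverse]

theorem sanitize_error_text_py_spec : Claim_equal_sanitize_error_text_py := by
  intro text max_chars _
  unfold Spec_sanitize_error_text_py sanitize_error_text_py sanitize_error_text_py_alt
  rw [foldB]
  simp only [Option.or_none]
  have hL : pvLinesA text = pvNorm (PySem.Str.splitlines text) := rfl
  rw [hL]
  simp only [pvScanA_reverse]
  rcases hn : (pvNorm (PySem.Str.splitlines text)).getLast? with _ | last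
  · have : pvNorm (PySem.Str.splitlines text) = [] := by
      simpa [List.getLast?_eq_none_iff] using hn
    simp [this]
  · have hne : pvNorm (PySem.Str.splitlines text) ≠ [] := by
      intro h; rw [h] at hn; simp at hn
    simp only [beq_iff_eq, if_neg hne]
    rcases hf : ((pvNorm (PySem.Str.splitlines text)).filter pvHasMarker).getLast? with _ | z
    · simp [PySem.List.pyGet?_neg_one, hn]
    · simp

-- ===== VERDICT (by name: the statement is the Claim_ definition above) =====
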